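-- pv_equiv track=rewrite | github.com/vibe2vibe/ive | backend/pipeline_engine.py | _parse_structured_result
-- ===== SOURCE A (Python) =====
-- from typing import Optional
--
-- def _parse_structured_result(output: str) -> Optional[str]:
--     """Check if output contains a structured pipeline result from MCP.
--
--     Returns 'pass' or 'fail' if found, None if not (fallback to keywords).
--     """
--     if not output:
--         return None
--     for line in output.split("\n"):
--         if line.startswith("__pipeline_result:"):
--             parts = line.split(":", 2)
--             if len(parts) >= 2:
--                 return parts[1].strip().lower()
--     return None
-- ===== SOURCE B (Python) =====
-- from typing import Optional
--
-- _PREFIX = "__pipeline_result:"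
--
-- def _parse_structured_result(output: str) -> Optional[str]:
--     """Index-based scan over the raw string: jump from line start to line start
--     with find('\n'), no list of lines materialized; on a match, take the chars
--     after the prefix up to the next ':' or end of line."""
--     i = 0
--     while True:
--         if output.startswith(_PREFIX, i):
--             j = i + len(_PREFIX)
--             k = j
--             while k < len(output) and output[k] != ':' and output[k] != '\n':
--                 k += 1
--             return output[j:k].strip().lower()
--         nl = output.find('\n', i)
--         if nl == -1:
--             return None
--         i = nl + 1
-- ===== Notes on version B (the rewrite author's own statement) =====
-- stated objective: alternative
-- what changed: B replaces A's materialized output.split('\n') list and per-line split(':',2) with a single index-based scan over the raw string (find('\n') jumps between line starts; on a match the value is read directly up to the next ':' or end of line).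
import Mathlib
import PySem

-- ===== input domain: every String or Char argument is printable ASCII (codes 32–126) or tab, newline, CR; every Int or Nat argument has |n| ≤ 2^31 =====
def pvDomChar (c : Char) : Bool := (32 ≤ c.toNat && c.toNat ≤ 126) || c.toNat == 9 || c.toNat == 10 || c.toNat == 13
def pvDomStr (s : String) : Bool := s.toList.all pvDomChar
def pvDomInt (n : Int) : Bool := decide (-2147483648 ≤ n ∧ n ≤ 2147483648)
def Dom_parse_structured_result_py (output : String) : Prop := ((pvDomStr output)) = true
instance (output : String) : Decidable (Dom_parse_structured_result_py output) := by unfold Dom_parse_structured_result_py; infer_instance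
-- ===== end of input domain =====

-- B replaces A's materialized line list + per-line split(':',2) with a single index-based
-- scan over the raw string (objective: alternative, same O(n) cost).

-- ===== PORT A =====
-- the 'for line in output.split("\n")' loop of A
def pvA_loop : List String → Option String
  | [] => none
  | line :: rest =>
    if PySem.Str.startswith line "__pipeline_result:" then
      match PySem.Str.splitMax? line ":" 2 with
      | some parts =>
          if 2 ≤ parts.length then
            -- parts[1]: in range, guarded by the length test just above
            some (PySem.Str.lower (PySem.Str.strip (parts.getD 1 "")))
          else pvA_loop rest
      | none => pvA_loop rest   -- unreachable: the separator ":" is nonempty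
    else pvA_loop rest

def parse_structured_result_py (output : String) : Option String :=
  if PySem.Str.len output = 0 then none   -- 'if not output: return None'
  else
    match PySem.Str.split? output "\n" with
    | some lines => pvA_loop lines
    | none => none   -- unreachable: the separator "\n" is nonempty

-- ===== PORT B =====
-- "__pipeline_result:" as a character list (len(_PREFIX) = 18)
def pvPfx : List Char :=
  ['_', '_', 'p', 'i', 'p', 'e', 'l', 'i', 'n', 'e', '_', 'r', 'e', 's', 'u', 'l', 't', ':']

-- inner 'while k < len(output) and output[k] != ':' and output[k] != '\n': k += 1'
-- followed by the slice output[j:k]: exactly the characters this loop walks over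
def pvB_take : List Char → List Char
  | [] => []
  | c :: cs => if c = ':' ∨ c = '\n' then [] else c :: pvB_take cs

-- outer loop of B on the suffix of the string starting at line-start index i:
-- output.startswith(_PREFIX, i) is pvPfx prefixing the suffix (exact for 0 ≤ i ≤ len);
-- 'nl = output.find('\n', i); if nl == -1: return None; i = nl + 1' is: drop up to the
-- next '\n' (dropWhile), return None if there is none, else continue just past it (tail)
def pvB_loop (s : List Char) : Option (List Char) :=
  if PySem.Chars.startswith s pvPfx then some (pvB_take (s.drop 18))
  else if h : s.dropWhile (· ≠ '\n') = [] then none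
  else pvB_loop (s.dropWhile (· ≠ '\n')).tail
termination_by s.length
decreasing_by
  have h1 := (List.dropWhile_suffix (l := s) (p := (· ≠ '\n'))).length_le
  have h2 : (s.dropWhile (· ≠ '\n')).tail.length + 1 = (s.dropWhile (· ≠ '\n')).length := by
    cases hd : s.dropWhile (· ≠ '\n') with
    | nil => exact absurd hd h
    | cons a l => simp
  omega

def parse_structured_result_py_alt (output : String) : Option String :=
  (pvB_loop output.toList).map
    (fun v => PySem.Str.lower (PySem.Str.strip (String.ofList v)))

-- ===== PRECONDITION & SPEC =====
def Spec_parse_structured_result_py (output : String) (out : Option String) : Prop := out = parse_structured_result_py_alt output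
instance (output : String) (out : Option String) : Decidable (Spec_parse_structured_result_py output out) := by unfold Spec_parse_structured_result_py; infer_instance

-- ===== CLAIM (what is proved, stated in full; the proofs are below) =====
def Claim_equal_parse_structured_result_py : Prop := ∀ (output : String), Dom_parse_structured_result_py output → Spec_parse_structured_result_py output (parse_structured_result_py output)

-- ===== LEMMAS AND PROOFS =====

-- reference form of output.split("\n") on character lists
def pvLines (s : List Char) : List (List Char) :=
  s.takeWhile (· ≠ '\n') ::
    (if h : s.dropWhile (· ≠ '\n') = [] then []
     else pvLines (s.dropWhile (· ≠ '\n')).tail)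
termination_by s.length
decreasing_by
  have h1 := (List.dropWhile_suffix (l := s) (p := (· ≠ '\n'))).length_le
  have h2 : (s.dropWhile (· ≠ '\n')).tail.length + 1 = (s.dropWhile (· ≠ '\n')).length := by
    cases hd : s.dropWhile (· ≠ '\n') with
    | nil => exact absurd hd h
    | cons a l => simp
  omega

-- "__pipeline_result" (the part of the prefix before its colon)
def pvPfxHead : List Char :=
  ['_', '_', 'p', 'i', 'p', 'e', 'l', 'i', 'n', 'e', '_', 'r', 'e', 's', 'u', 'l', 't']

-- reference form of line.split(":", m) on character lists
def pvSplitMaxRef : Nat → List Char → List (List Char)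
  | 0, l => [l]
  | m + 1, l =>
      l.takeWhile (· ≠ ':') ::
        (match l.dropWhile (· ≠ ':') with
         | [] => []
         | _ :: t => pvSplitMaxRef m t)

theorem pvLines_eq (s : List Char) :
    pvLines s = s.takeWhile (· ≠ '\n') ::
      (if h : s.dropWhile (· ≠ '\n') = [] then []
       else pvLines (s.dropWhile (· ≠ '\n')).tail) := by
  conv_lhs => rw [pvLines]

theorem pvSplitMaxRef_succ (m : Nat) (l : List Char) :
    pvSplitMaxRef (m + 1) l = l.takeWhile (· ≠ ':') ::
      (match l.dropWhile (· ≠ ':') with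
       | [] => []
       | _ :: t => pvSplitMaxRef m t) := rfl

theorem pvA_loop_cons (line : String) (rest : List String) :
    pvA_loop (line :: rest)
      = if PySem.Str.startswith line "__pipeline_result:" then
          match PySem.Str.splitMax? line ":" 2 with
          | some parts =>
              if 2 ≤ parts.length then
                some (PySem.Str.lower (PySem.Str.strip (parts.getD 1 "")))
              else pvA_loop rest
          | none => pvA_loop rest
        else pvA_loop rest := rfl

theorem pv_modifyHead_id {α : Type} (l : List α) : l.modifyHead (fun x => x) = l := by
  cases l <;> simp

theorem pvLines_cons_nl (rest : List Char) : pvLines ('\n' :: rest) = [] :: pvLines rest := by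
  have h1 : List.takeWhile (· ≠ '\n') ('\n' :: rest) = ([] : List Char) := by simp
  have h2 : List.dropWhile (· ≠ '\n') ('\n' :: rest) = '\n' :: rest := by simp
  rw [pvLines_eq, h1, h2, dif_neg (List.cons_ne_nil _ _), List.tail_cons]

theorem pvLines_cons_ne (c : Char) (rest : List Char) (hc : ¬ c = '\n') :
    pvLines (c :: rest) = (c :: rest.takeWhile (· ≠ '\n')) :: (pvLines rest).tail := by
  have h1 : List.takeWhile (· ≠ '\n') (c :: rest) = c :: rest.takeWhile (· ≠ '\n') := by
    simp [hc]
  have h2 : List.dropWhile (· ≠ '\n') (c :: rest) = List.dropWhile (· ≠ '\n') rest := by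
    simp [hc]
  rw [pvLines_eq, h1, h2]
  conv_rhs => rw [pvLines_eq, List.tail_cons]

theorem pvLines_head_tail (s : List Char) :
    pvLines s = s.takeWhile (· ≠ '\n') :: (pvLines s).tail := by
  conv_lhs => rw [pvLines_eq]
  conv_rhs => rw [pvLines_eq, List.tail_cons]

theorem pv_go_spec : ∀ (fuel : Nat) (l cur : List Char) (acc : List (List Char)),
    l.length < fuel →
    PySem.Chars.splitOn.go ['\n'] fuel l cur acc
      = acc.reverse ++ (pvLines l).modifyHead (fun x => cur.reverse ++ x) := by
  intro fuel
  induction fuel with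
  | zero => intro l cur acc h; omega
  | succ n ih =>
    intro l cur acc h
    match l with
    | [] =>
      rw [pvLines_eq]
      simp [PySem.Chars.splitOn.go]
    | c :: rest =>
      by_cases hc : c = '\n'
      · subst hc
        have hstep : PySem.Chars.splitOn.go ['\n'] (n+1) ('\n' :: rest) cur acc
            = PySem.Chars.splitOn.go ['\n'] n rest [] (cur.reverse :: acc) := by
          simp [PySem.Chars.splitOn.go, List.isPrefixOf]
        rw [hstep, ih rest [] (cur.reverse :: acc) (by simpa using Nat.lt_of_succ_lt_succ h)]
        rw [pvLines_cons_nl, pvLines_head_tail rest]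
        simp
      · have hstep : PySem.Chars.splitOn.go ['\n'] (n+1) (c :: rest) cur acc
            = PySem.Chars.splitOn.go ['\n'] n rest (c :: cur) acc := by
          simp [PySem.Chars.splitOn.go, List.isPrefixOf]
          intro hcontra; exact absurd hcontra.symm hc
        rw [hstep, ih rest (c :: cur) acc (by simpa using Nat.lt_of_succ_lt_succ h)]
        rw [pvLines_cons_ne c rest hc, pvLines_head_tail rest]
        simp

theorem pv_splitOn_eq (s : List Char) :
    PySem.Chars.splitOn s ['\n'] = pvLines s := by
  unfold PySem.Chars.splitOn
  rw [pv_go_spec (s.length + 1) s [] [] (by omega)]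
  simp [pv_modifyHead_id]

theorem pvSplitMaxRef_head_tail (m : Nat) (l : List Char) :
    pvSplitMaxRef (m + 1) l = l.takeWhile (· ≠ ':') :: (pvSplitMaxRef (m + 1) l).tail := by
  conv_lhs => rw [pvSplitMaxRef_succ]
  conv_rhs => rw [pvSplitMaxRef_succ, List.tail_cons]

theorem pvSplitMaxRef_cons_colon (m : Nat) (rest : List Char) :
    pvSplitMaxRef (m + 1) (':' :: rest) = [] :: pvSplitMaxRef m rest := by
  rw [pvSplitMaxRef_succ]
  have h1 : List.takeWhile (· ≠ ':') (':' :: rest) = ([] : List Char) := by simp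
  have h2 : List.dropWhile (· ≠ ':') (':' :: rest) = ':' :: rest := by simp
  rw [h1, h2]

theorem pvSplitMaxRef_cons_ne (m : Nat) (c : Char) (rest : List Char) (hc : ¬ c = ':') :
    pvSplitMaxRef (m + 1) (c :: rest)
      = (c :: rest.takeWhile (· ≠ ':')) :: (pvSplitMaxRef (m + 1) rest).tail := by
  have h1 : List.takeWhile (· ≠ ':') (c :: rest) = c :: rest.takeWhile (· ≠ ':') := by
    simp [hc]
  have h2 : List.dropWhile (· ≠ ':') (c :: rest) = List.dropWhile (· ≠ ':') rest := by
    simp [hc]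
  rw [pvSplitMaxRef_succ, h1, h2]
  conv_rhs => rw [pvSplitMaxRef_succ, List.tail_cons]

theorem pv_goMax_spec : ∀ (fuel : Nat) (m : Nat) (l cur : List Char) (acc : List (List Char)),
    l.length < fuel →
    PySem.Chars.splitOnMax.go [':'] fuel m l cur acc
      = acc.reverse ++ (pvSplitMaxRef m l).modifyHead (fun x => cur.reverse ++ x) := by
  intro fuel
  induction fuel with
  | zero => intro m l cur acc h; omega
  | succ n ih =>
    intro m l cur acc h
    match l with
    | [] =>
      match m with
      | 0 => simp [PySem.Chars.splitOnMax.go, pvSplitMaxRef]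
      | m' + 1 => simp [PySem.Chars.splitOnMax.go, pvSplitMaxRef]
    | c :: rest =>
      match m with
      | 0 => simp [PySem.Chars.splitOnMax.go, pvSplitMaxRef]
      | m' + 1 =>
        by_cases hc : c = ':'
        · subst hc
          have hstep : PySem.Chars.splitOnMax.go [':'] (n+1) (m'+1) (':' :: rest) cur acc
              = PySem.Chars.splitOnMax.go [':'] n m' rest [] (cur.reverse :: acc) := by
            simp [PySem.Chars.splitOnMax.go, List.isPrefixOf]
          rw [hstep, ih m' rest [] (cur.reverse :: acc) (by simpa using Nat.lt_of_succ_lt_succ h)]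
          rw [pvSplitMaxRef_cons_colon]
          cases hr : pvSplitMaxRef m' rest with
          | nil => simp
          | cons a as => simp
        · have hstep : PySem.Chars.splitOnMax.go [':'] (n+1) (m'+1) (c :: rest) cur acc
              = PySem.Chars.splitOnMax.go [':'] n (m'+1) rest (c :: cur) acc := by
            simp [PySem.Chars.splitOnMax.go, List.isPrefixOf]
            intro hcontra; exact absurd hcontra.symm hc
          rw [hstep, ih (m'+1) rest (c :: cur) acc (by simpa using Nat.lt_of_succ_lt_succ h)]
          rw [pvSplitMaxRef_cons_ne m' c rest hc, pvSplitMaxRef_head_tail m' rest]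
          simp

theorem pv_splitOnMax_eq (l : List Char) :
    PySem.Chars.splitOnMax l [':'] 2 = pvSplitMaxRef 2 l := by
  unfold PySem.Chars.splitOnMax
  norm_num
  rw [pv_goMax_spec (l.length + 1) _ l [] [] (by omega)]
  simp [pv_modifyHead_id]

-- pvB_take is the ':'-or-'\n'-bounded take
theorem pv_take_eq (t : List Char) :
    pvB_take t = (t.takeWhile (· ≠ '\n')).takeWhile (· ≠ ':') := by
  induction t with
  | nil => simp [pvB_take]
  | cons c cs ih =>
    by_cases h1 : c = ':'
    · subst h1; simp [pvB_take]
    · by_cases h2 : c = '\n'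
      · subst h2; simp [pvB_take]
      · simp [pvB_take, h1, h2, ih]

theorem pv_takeWhile_append (q : Char → Bool) (p t : List Char) (hp : ∀ x ∈ p, q x = true) :
    (p ++ t).takeWhile q = p ++ t.takeWhile q := by
  induction p with
  | nil => simp
  | cons c cs ih =>
    simp at hp
    simp [hp.1, ih hp.2]

theorem pv_dropWhile_append (q : Char → Bool) (p t : List Char) (hp : ∀ x ∈ p, q x = true) :
    (p ++ t).dropWhile q = t.dropWhile q := by
  induction p with
  | nil => simp
  | cons c cs ih =>
    simp at hp
    simp [hp.1, ih hp.2]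

theorem pv_pfx_toList : "__pipeline_result:".toList = pvPfx := by decide

theorem pv_pfx_split : pvPfx = pvPfxHead ++ [':'] := rfl

theorem pv_pfxHead_ncolon : ∀ x ∈ pvPfxHead, (decide (x ≠ ':')) = true := by
  intro x hx
  fin_cases hx <;> rfl

theorem pv_pfx_nonl : ∀ x ∈ pvPfx, (decide (x ≠ '\n')) = true := by
  intro x hx
  fin_cases hx <;> rfl

-- parts and parts[1] of line.split(":", 2) for a line that starts with the prefix
theorem pv_parts (x : List Char) :
    pvSplitMaxRef 2 (pvPfx ++ x)
      = pvPfxHead :: x.takeWhile (· ≠ ':')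
          :: (match x.dropWhile (· ≠ ':') with | [] => [] | _ :: u => [u]) := by
  have hassoc : pvPfx ++ x = pvPfxHead ++ (':' :: x) := by
    rw [pv_pfx_split, List.append_assoc]
    rfl
  have h1 : List.takeWhile (· ≠ ':') (pvPfx ++ x) = pvPfxHead := by
    rw [hassoc, pv_takeWhile_append _ _ _ pv_pfxHead_ncolon]
    simp
  have h2 : List.dropWhile (· ≠ ':') (pvPfx ++ x) = ':' :: x := by
    rw [hassoc, pv_dropWhile_append _ _ _ pv_pfxHead_ncolon]
    simp
  rw [show (2 : Nat) = 1 + 1 from rfl, pvSplitMaxRef_succ, h1, h2]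
  show pvPfxHead :: pvSplitMaxRef 1 x = _
  rw [show (1 : Nat) = 0 + 1 from rfl, pvSplitMaxRef_succ]
  cases hd : List.dropWhile (· ≠ ':') x with
  | nil => rfl
  | cons a u => rfl

-- A's test on a line, moved to the character level
theorem pv_startswith_ofList (l : List Char) :
    PySem.Str.startswith (String.ofList l) "__pipeline_result:"
      = PySem.Chars.startswith l pvPfx := by
  rw [PySem.Str.startswith, pv_pfx_toList]
  simp

-- A's split on a line, moved to the character level
theorem pv_splitMax_ofList (l : List Char) :
    PySem.Str.splitMax? (String.ofList l) ":" 2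
      = some ((pvSplitMaxRef 2 l).map String.ofList) := by
  have hcol : ":".toList = [':'] := by decide
  rw [PySem.Str.splitMax?]
  simp [PySem.Chars.splitMax?, hcol, pv_splitOnMax_eq]

-- main structural lemma: A's line loop over the reference split equals B's scan
theorem pv_main (s : List Char) :
    pvA_loop ((pvLines s).map String.ofList)
      = (pvB_loop s).map (fun v => PySem.Str.lower (PySem.Str.strip (String.ofList v))) := by
  induction s using pvB_loop.induct with
  | case1 s hsw =>
    rw [pvB_loop]
    simp only [hsw, if_true]
    have hpfx : pvPfx <+: s := by
      rw [PySem.Chars.startswith] at hsw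
      exact List.isPrefixOf_iff_prefix.mp hsw
    obtain ⟨t, rfl⟩ := hpfx
    have hdrop : (pvPfx ++ t).drop 18 = t := by
      rw [show (18 : Nat) = pvPfx.length from rfl, List.drop_left]
    have hTW : List.takeWhile (· ≠ '\n') (pvPfx ++ t)
        = pvPfx ++ List.takeWhile (· ≠ '\n') t :=
      pv_takeWhile_append _ _ _ pv_pfx_nonl
    rw [pvLines_head_tail, hTW, List.map_cons, pvA_loop_cons]
    have hsw2 : PySem.Str.startswith
        (String.ofList (pvPfx ++ List.takeWhile (· ≠ '\n') t)) "__pipeline_result:" = true := by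
      rw [pv_startswith_ofList, PySem.Chars.startswith]
      exact List.isPrefixOf_iff_prefix.mpr (List.prefix_append _ _)
    rw [hsw2, if_pos rfl, pv_splitMax_ofList, pv_parts]
    rw [hdrop, pv_take_eq]
    cases hd : List.dropWhile (· ≠ ':') (List.takeWhile (· ≠ '\n') t) with
    | nil => simp [List.getD]
    | cons a u => simp [List.getD]
  | case2 s hsw hdw =>
    rw [pvB_loop]
    simp only [hsw, if_false, Bool.false_eq_true]
    rw [dif_pos hdw]
    rw [pvLines_eq, dif_pos hdw, List.map_cons, List.map_nil, pvA_loop_cons]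
    have hln : PySem.Str.startswith
        (String.ofList (s.takeWhile (· ≠ '\n'))) "__pipeline_result:" = false := by
      rw [pv_startswith_ofList, PySem.Chars.startswith]
      rw [Bool.eq_false_iff]
      intro hax
      have h1 : pvPfx <+: s.takeWhile (· ≠ '\n') := List.isPrefixOf_iff_prefix.mp hax
      have h2 : pvPfx <+: s := h1.trans (List.takeWhile_prefix _)
      have h3 : PySem.Chars.startswith s pvPfx = true := by
        rw [PySem.Chars.startswith]
        exact List.isPrefixOf_iff_prefix.mpr h2
      simp [h3] at hsw
    rw [hln, if_neg (by simp)]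
    rfl
  | case3 s hsw hdw ih =>
    rw [pvB_loop]
    simp only [hsw, if_false, Bool.false_eq_true]
    rw [dif_neg hdw]
    rw [pvLines_eq, dif_neg hdw, List.map_cons, pvA_loop_cons]
    have hln : PySem.Str.startswith
        (String.ofList (s.takeWhile (· ≠ '\n'))) "__pipeline_result:" = false := by
      rw [pv_startswith_ofList, PySem.Chars.startswith]
      rw [Bool.eq_false_iff]
      intro hax
      have h1 : pvPfx <+: s.takeWhile (· ≠ '\n') := List.isPrefixOf_iff_prefix.mp hax
      have h2 : pvPfx <+: s := h1.trans (List.takeWhile_prefix _)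
      have h3 : PySem.Chars.startswith s pvPfx = true := by
        rw [PySem.Chars.startswith]
        exact List.isPrefixOf_iff_prefix.mpr h2
      simp [h3] at hsw
    rw [hln, if_neg (by simp)]
    exact ih

-- ===== VERDICT (by name: the statement is the Claim_ definition above) =====
theorem parse_structured_result_py_spec : Claim_equal_parse_structured_result_py := by
  intro output _
  unfold Spec_parse_structured_result_py
  unfold parse_structured_result_py parse_structured_result_py_alt
  by_cases hlen : PySem.Str.len output = 0
  · have hnil : output.toList = [] := by
      simp [PySem.Str.len] at hlen
      simpa using hlen
    have hb : pvB_loop [] = none := by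
      rw [pvB_loop]
      simp [PySem.Chars.startswith, pvPfx]
    simp [hnil, hb]
  · simp only [hlen, if_false]
    have hsplit : PySem.Str.split? output "\n"
        = some ((pvLines output.toList).map String.ofList) := by
      have hnl : "\n".toList = ['\n'] := by decide
      simp [PySem.Str.split?, PySem.Chars.split?, hnl, pv_splitOn_eq]
    rw [hsplit]
    exact pv_main output.toList
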